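-- pv_equiv track=rewrite | github.com/kjasperi/AdventOfCode | 2023/day7/p2.py | tie_cmp
-- ===== SOURCE A (Python) =====
-- priot = {'A' : 1, 'K' : 2, 'Q' : 3, 'T':5, '9': 6, '8': 7, '7': 8, '6': 9, '5': 10, '4': 11, '3': 12, '2': 13, 'J': 14,}
--
-- def tie_cmp(h_a, h_b):
--     a, bid_a = h_a
--     b, bid_b = h_b
--     if not a:
--         return 0
--     if priot[a[0]] > priot[b[0]]:
--         return 1
--     elif priot[a[0]] < priot[b[0]]:
--         return -1
--     return tie_cmp((a[1:], 0), (b[1:], 0))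
-- ===== SOURCE B (Python) =====
-- priot = {'A' : 1, 'K' : 2, 'Q' : 3, 'T':5, '9': 6, '8': 7, '7': 8, '6': 9, '5': 10, '4': 11, '3': 12, '2': 13, 'J': 14,}
--
-- def tie_cmp(h_a, h_b):
--     a, _ = h_a
--     b, _ = h_b
--     for i in range(len(a)):
--         pa = priot[a[i]]
--         pb = priot[b[i]]
--         if pa > pb:
--             return 1
--         if pa < pb:
--             return -1
--     return 0
-- ===== Notes on version B (the rewrite author's own statement) =====
-- stated objective: faster
-- what changed: Replaced the tail recursion that rebuilds both hands with a[1:]/b[1:] slices at every step by a single index loop over the original strings.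
import Mathlib
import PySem

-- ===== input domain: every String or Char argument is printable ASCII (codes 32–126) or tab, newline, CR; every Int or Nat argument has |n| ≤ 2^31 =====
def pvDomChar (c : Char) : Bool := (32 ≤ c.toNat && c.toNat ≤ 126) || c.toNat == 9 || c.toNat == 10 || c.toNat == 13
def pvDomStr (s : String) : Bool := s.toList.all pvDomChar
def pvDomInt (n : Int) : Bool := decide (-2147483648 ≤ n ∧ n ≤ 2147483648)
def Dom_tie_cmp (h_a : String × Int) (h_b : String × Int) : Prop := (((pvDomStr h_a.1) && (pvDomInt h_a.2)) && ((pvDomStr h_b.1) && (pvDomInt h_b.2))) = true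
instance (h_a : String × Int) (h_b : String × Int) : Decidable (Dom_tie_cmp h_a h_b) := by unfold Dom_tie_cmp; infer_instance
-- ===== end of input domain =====

-- B replaces A's tail recursion on a[1:]/b[1:] slices by one index loop over the strings; return value only (no mutation).

-- ===== PORT A =====
def priot : PySem.Dict Char Int :=
  PySem.Dict.ofList [('A', 1), ('K', 2), ('Q', 3), ('T', 5), ('9', 6), ('8', 7), ('7', 8),
                     ('6', 9), ('5', 10), ('4', 11), ('3', 12), ('2', 13), ('J', 14)]

-- priot[c]; KeyError (none) is outside Pre_, default 0 is never reached there
def priotD (c : Char) : Int := (PySem.Dict.get? priot c).getD 0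

def tieA : List Char → List Char → Int
  | [], _ => 0
  | a :: as, bl =>
    match bl with
    | [] => 0          -- b[0] raises IndexError in Python; outside Pre_
    | b :: bs =>
      if priotD a > priotD b then 1
      else if priotD a < priotD b then -1
      else tieA as bs  -- tie_cmp((a[1:], 0), (b[1:], 0))

def tie_cmp (h_a : String × Int) (h_b : String × Int) : Int :=
  tieA h_a.1.toList h_b.1.toList

-- ===== PORT B =====
-- the 'for i in range(len(a))' loop; a[i] is always in range, b[i] out of range raises (outside Pre_)
def tieBloop (a b : List Char) (i : Nat) : Int :=
  if _h : i < a.length then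
    let pa := priotD (a.getD i ' ')
    let pb := priotD (b.getD i ' ')   -- default reached only when b[i] would raise IndexError, outside Pre_
    if pa > pb then 1
    else if pa < pb then -1
    else tieBloop a b (i + 1)
  else 0
termination_by a.length - i

def tie_cmp_alt (h_a : String × Int) (h_b : String × Int) : Int :=
  tieBloop h_a.1.toList h_b.1.toList 0

-- ===== PRECONDITION & SPEC =====
def pvCards : List Char := ['A','K','Q','T','9','8','7','6','5','4','3','2','J']

-- Pre_ excludes exactly the inputs where Python raises: a KeyError on a character outside the 13
-- card characters, or an IndexError when b is exhausted, reached before the comparison is decided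
-- (i.e. before the first position where the two strings differ).
def Pre_tie_cmp (h_a : String × Int) (h_b : String × Int) : Prop :=
  ∀ i : Nat, i < h_a.1.toList.length → h_a.1.toList.take i = h_b.1.toList.take i →
    (i < h_b.1.toList.length ∧ h_a.1.toList.getD i ' ' ∈ pvCards ∧ h_b.1.toList.getD i ' ' ∈ pvCards)
instance (h_a : String × Int) (h_b : String × Int) : Decidable (Pre_tie_cmp h_a h_b) := by
  unfold Pre_tie_cmp; infer_instance

def pvWitness_tie_cmp : (String × Int) × (String × Int) := (("A2K", 7), ("AJK", 0))

def Spec_tie_cmp (h_a : String × Int) (h_b : String × Int) (out : Int) : Prop := out = tie_cmp_alt h_a h_b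
instance (h_a : String × Int) (h_b : String × Int) (out : Int) : Decidable (Spec_tie_cmp h_a h_b out) := by unfold Spec_tie_cmp; infer_instance

-- ===== CLAIM (what is proved, stated in full; the proofs are below) =====
def Claim_equal_tie_cmp : Prop := ∀ (h_a : String × Int) (h_b : String × Int), Dom_tie_cmp h_a h_b → Pre_tie_cmp h_a h_b → Spec_tie_cmp h_a h_b (tie_cmp h_a h_b)

-- ===== LEMMAS AND PROOFS =====

-- priot assigns distinct priorities to the 13 card characters
lemma priotD_inj (a b : Char) (ha : a ∈ pvCards) (hb : b ∈ pvCards)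
    (h : priotD a = priotD b) : a = b := by
  fin_cases ha <;> fin_cases hb <;> simp_all [priotD, priot] <;> revert h <;> decide

-- shifting the loop index by one is the same as dropping the heads
lemma tieBloop_shift (a b : Char) : ∀ (as bs : List Char) (i : Nat),
    tieBloop (a :: as) (b :: bs) (i + 1) = tieBloop as bs i := by
  intro as bs i
  induction h : as.length - i using Nat.strong_induction_on generalizing i with
  | _ n ih =>
    rw [tieBloop]
    conv_rhs => rw [tieBloop]
    by_cases hi : i < as.length
    · rw [dif_pos (by simpa using hi), dif_pos hi]
      simp only [List.getD_cons_succ]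
      split_ifs <;> try rfl
      exact ih (as.length - (i + 1)) (by omega) (i + 1) rfl
    · rw [dif_neg (by simpa using hi), dif_neg hi]

-- the list-level precondition
def PreL (la lb : List Char) : Prop :=
  ∀ i : Nat, i < la.length → la.take i = lb.take i →
    (i < lb.length ∧ la.getD i ' ' ∈ pvCards ∧ lb.getD i ' ' ∈ pvCards)

lemma tieA_eq_tieBloop : ∀ la lb : List Char, PreL la lb → tieA la lb = tieBloop la lb 0 := by
  intro la
  induction la with
  | nil => intro lb _; rw [tieA, tieBloop]; simp
  | cons a as ih =>
    intro lb hpre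
    obtain ⟨hlen, ha, hb⟩ := hpre 0 (by simp) (by simp)
    cases lb with
    | nil => simp at hlen
    | cons b bs =>
      simp only [List.getD_cons_zero] at ha hb
      rw [tieA, tieBloop]
      simp only [List.length_cons, Nat.succ_pos, dif_pos, List.getD_cons_zero]
      split_ifs with h1 h2
      · rfl
      · rfl
      · have hab : a = b := priotD_inj a b ha hb (by omega)
        subst hab
        rw [tieBloop_shift]
        apply ih
        intro i hi htake
        have := hpre (i + 1) (by simpa using Nat.succ_lt_succ hi) (by simp [htake])
        simpa using this

-- ===== VERDICT (by name: the statement is the Claim_ definition above) =====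
theorem tie_cmp_spec : Claim_equal_tie_cmp := by
  intro h_a h_b _ hpre
  unfold Spec_tie_cmp tie_cmp tie_cmp_alt
  exact tieA_eq_tieBloop _ _ hpre
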